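-- pv_equiv track=rewrite | github.com/beyondReal-smap/hwgi_ai_assistant | silson_rag/src/engine/filters.py | infer_generation_from_join_ym
-- ===== SOURCE A (Python) =====
-- from typing import Any, Dict, List, Optional
--
-- GENERATION_SALES_RANGES = {
--     "1세대": (None, 200907),
--     "2세대": (200908, 201703),
--     "3세대": (201704, 202106),
--     "4세대": (202107, None),
-- }
--
-- def infer_generation_from_join_ym(join_ym: int) -> Optional[str]:
--     """Infer generation from join date based on sales period overlap."""
--     for gen, (start, end) in GENERATION_SALES_RANGES.items():
--         if start is not None and join_ym < start:
--             continue
--         if end is not None and join_ym > end: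
--             continue
--         return gen
--     return None
-- ===== SOURCE B (Python) =====
-- from typing import Optional
--
-- # Ascending start thresholds of generations 2..4; index found by binary search
-- # picks the generation label directly.
-- _THRESHOLDS = [200908, 201704, 202107]
-- _GENS = ["1세대", "2세대", "3세대", "4세대"]
--
-- def infer_generation_from_join_ym(join_ym: int) -> Optional[str]:
--     """Infer generation from join date via binary search over start thresholds."""
--     lo, hi = 0, len(_THRESHOLDS)
--     while lo < hi:
--         mid = (lo + hi) // 2
--         if join_ym < _THRESHOLDS[mid]:
--             hi = mid
--         else:
--             lo = mid + 1
--     return _GENS[lo]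
-- ===== Notes on version B (the rewrite author's own statement) =====
-- stated objective: idiomatic
-- what changed: Replaces the per-entry two-bound scan of the range dict by a binary search (bisect_right, hand-written since A imports no bisect) over the three ascending generation-start thresholds, indexing a parallel label table; the contiguous exhaustive ranges make both total and equal.
import Mathlib
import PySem

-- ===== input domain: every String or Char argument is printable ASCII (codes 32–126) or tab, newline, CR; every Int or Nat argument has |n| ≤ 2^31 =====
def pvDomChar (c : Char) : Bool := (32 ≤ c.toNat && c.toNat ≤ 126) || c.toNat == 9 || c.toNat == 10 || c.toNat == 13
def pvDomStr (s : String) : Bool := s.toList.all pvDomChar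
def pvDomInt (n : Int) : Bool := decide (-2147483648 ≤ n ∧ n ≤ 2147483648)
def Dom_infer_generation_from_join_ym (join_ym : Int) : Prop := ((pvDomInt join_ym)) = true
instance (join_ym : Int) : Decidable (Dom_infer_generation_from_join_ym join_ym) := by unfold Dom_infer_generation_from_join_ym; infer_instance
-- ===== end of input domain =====

-- B replaces A's per-entry range scan by a binary search over ascending start
-- thresholds with a parallel label table (idiomatic bisect-style lookup; same
-- value everywhere since the four ranges are contiguous and exhaustive).


-- ===== PORT A =====
-- GENERATION_SALES_RANGES as an insertion-ordered association list
def genSalesRanges : List (String × Option Int × Option Int) :=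
  [("1세대", (none, some 200907)),
   ("2세대", (some 200908, some 201703)),
   ("3세대", (some 201704, some 202106)),
   ("4세대", (some 202107, none))]

-- the for-loop with its two 'continue' branches, step for step
def genLoopA (join_ym : Int) : List (String × Option Int × Option Int) → Option String
  | [] => none
  | (gen, start, «end») :: rest =>
    if (match start with | some st => decide (join_ym < st) | none => false) then
      genLoopA join_ym rest
    else if (match «end» with | some en => decide (en < join_ym) | none => false) then
      genLoopA join_ym rest
    else
      some gen

def infer_generation_from_join_ym (join_ym : Int) : Option String :=
  genLoopA join_ym genSalesRanges

-- ===== PORT B =====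
def thresholdsB : List Int := [200908, 201704, 202107]
def gensB : List String := ["1세대", "2세대", "3세대", "4세대"]

-- the hand-written bisect_right while-loop of Source B; indices stay in range so
-- List.getD's default is never used
def bsLoopB (join_ym : Int) (lo hi : Nat) : Nat :=
  if lo < hi then
    let mid := (lo + hi) / 2
    if join_ym < thresholdsB.getD mid 0 then bsLoopB join_ym lo mid
    else bsLoopB join_ym (mid + 1) hi
  else lo
termination_by hi - lo
decreasing_by all_goals omega

def infer_generation_from_join_ym_alt (join_ym : Int) : Option String :=
  gensB[bsLoopB join_ym 0 thresholdsB.length]?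

-- ===== PRECONDITION & SPEC =====
def Spec_infer_generation_from_join_ym (join_ym : Int) (out : Option String) : Prop := out = infer_generation_from_join_ym_alt join_ym
instance (join_ym : Int) (out : Option String) : Decidable (Spec_infer_generation_from_join_ym join_ym out) := by unfold Spec_infer_generation_from_join_ym; infer_instance

-- ===== CLAIM (what is proved, stated in full; the proofs are below) =====
def Claim_equal_infer_generation_from_join_ym : Prop := ∀ (join_ym : Int), Dom_infer_generation_from_join_ym join_ym → Spec_infer_generation_from_join_ym join_ym (infer_generation_from_join_ym join_ym)

-- ===== LEMMAS AND PROOFS =====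

-- ===== VERDICT (by name: the statement is the Claim_ definition above) =====
theorem infer_generation_from_join_ym_spec : Claim_equal_infer_generation_from_join_ym := by
  intro y _
  unfold Spec_infer_generation_from_join_ym infer_generation_from_join_ym
    infer_generation_from_join_ym_alt genSalesRanges
  by_cases h1 : y < 200908
  · have a0 : ¬ 200907 < y := by omega
    have b2 : y < 201704 := by omega
    simp [genLoopA, bsLoopB, thresholdsB, gensB, h1, a0, b2]
  · by_cases h2 : y < 201704
    · have a1 : 200907 < y := by omega
      have a2 : ¬ 201703 < y := by omega
      simp [genLoopA, bsLoopB, thresholdsB, gensB, h1, h2, a1, a2]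
    · by_cases h3 : y < 202107
      · have a1 : 200907 < y := by omega
        have a2 : 201703 < y := by omega
        have a3 : ¬ 202106 < y := by omega
        simp [genLoopA, bsLoopB, thresholdsB, gensB, h1, h2, h3, a1, a2, a3]
      · have a1 : 200907 < y := by omega
        have a2 : 201703 < y := by omega
        have a3 : 202106 < y := by omega
        simp [genLoopA, bsLoopB, thresholdsB, gensB, h1, h2, h3, a1, a2, a3]
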